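-- pv_equiv track=rewrite | github.com/thaReal/MasterChef | codeforces/round_653/array.py | solve
-- ===== SOURCE A (Python) =====
-- from collections import Counter
--
-- def solve(n, k, a):
-- 	mod_a = [a[i] % k if a[i] >= k else k - a[i] for i in range(n)]
-- 	cntr = Counter(mod_a)
--
-- 	if 0 in cntr.keys():
-- 		cntr.pop(0)
--
-- 	if len(cntr) == 0:
-- 		return 0
--
-- 	m = max(cntr.values())
-- 	if m == 1:
-- 		return max(cntr.keys()) + 1
--
-- 	k_lst = list(cntr.keys())
-- 	for key in k_lst:
-- 		if cntr[key] != m: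
-- 			cntr.pop(key)
--
-- 	offset = max(cntr.keys())
--
-- 	return k * (m - 1) + offset + 1
-- ===== SOURCE B (Python) =====
-- def solve(n, k, a):
--     # Sort-then-scan instead of hashing: sort the transformed residues and walk
--     # runs of equal values, keeping the best (longest, ties to larger value)
--     # nonzero run; no Counter, no pruning phases.
--     mods = sorted((a[i] % k if a[i] >= k else k - a[i]) for i in range(n))
--     best_c = best_v = run_c = run_v = 0
--     for x in mods:
--         if run_c > 0 and x == run_v:
--             run_c += 1
--         else:
--             run_c, run_v = 1, x
--         if run_v != 0 and run_c >= best_c: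
--             best_c, best_v = run_c, run_v
--     return 0 if best_c == 0 else k * (best_c - 1) + best_v + 1
-- ===== Notes on version B (the rewrite author's own statement) =====
-- stated objective: alternative
-- what changed: Replaces A's Counter-based multi-phase scheme (hash counts, max of counts, m==1 special case, prune non-maximal keys, max of surviving keys) by sort-then-scan: sort the transformed residues and walk runs of equal values in one pass, keeping the longest (ties to larger value) nonzero run, from which the answer k*(c-1)+v+1 is read off.
import Mathlib
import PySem

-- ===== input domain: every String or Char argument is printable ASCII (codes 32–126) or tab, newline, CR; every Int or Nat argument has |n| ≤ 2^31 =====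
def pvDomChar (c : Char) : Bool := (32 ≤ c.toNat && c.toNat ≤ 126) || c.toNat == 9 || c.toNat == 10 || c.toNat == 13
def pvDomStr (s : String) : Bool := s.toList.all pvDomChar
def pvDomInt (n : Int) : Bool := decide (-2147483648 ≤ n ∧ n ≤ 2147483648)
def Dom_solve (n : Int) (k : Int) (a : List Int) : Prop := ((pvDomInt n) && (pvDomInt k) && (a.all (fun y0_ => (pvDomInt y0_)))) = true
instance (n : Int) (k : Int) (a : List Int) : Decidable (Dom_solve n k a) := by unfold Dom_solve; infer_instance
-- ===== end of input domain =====

-- B replaces A's Counter-based multi-phase scheme (hash counts, max of counts, m==1 case,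
-- prune non-maximal keys, max of surviving keys) by sort-then-scan over runs; objective: alternative.

-- ===== PORT A =====
def solve (n : Int) (k : Int) (a : List Int) : Int :=
  let mod_a : List Int := (PySem.List.pyRange 0 n 1).map (fun i =>
    let x := PySem.List.pyGetD a i 0        -- a[i]; in range under Pre_solve
    if x ≥ k then PySem.Int.mod x k else k - x)
  let cntr : PySem.Dict Int Int := PySem.Dict.counter mod_a
  let cntr := if cntr.contains 0 then cntr.erase 0 else cntr
  if cntr.size = 0 then 0
  else
    let m : Int := (PySem.List.max? cntr.values (fun y => y)).getD 0   -- max(cntr.values()); nonempty here, .getD unreachable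
    if m = 1 then (PySem.List.max? cntr.keys (fun y => y)).getD 0 + 1
    else
      let k_lst := cntr.keys
      let cntr := k_lst.foldl (fun d key => if d.getD key 0 ≠ m then d.erase key else d) cntr
      let offset := (PySem.List.max? cntr.keys (fun y => y)).getD 0
      k * (m - 1) + offset + 1

-- ===== PORT B =====
-- the body of B's for-loop: state ((best_c, best_v), (run_c, run_v)), next element x
def bstep2 (st : (Int × Int) × Int × Int) (x : Int) : (Int × Int) × Int × Int :=
  let rr : Int × Int := if st.2.1 > 0 ∧ x = st.2.2 then (st.2.1 + 1, st.2.2) else (1, x)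
  if rr.2 ≠ 0 ∧ rr.1 ≥ st.1.1 then (rr, rr) else (st.1, rr)

def solve_alt (n : Int) (k : Int) (a : List Int) : Int :=
  let mods := PySem.List.sorted ((PySem.List.pyRange 0 n 1).map (fun i =>
    let x := PySem.List.pyGetD a i 0        -- a[i]; in range under Pre_solve
    if x ≥ k then PySem.Int.mod x k else k - x)) (fun y => y) false
  let st := mods.foldl bstep2 ((0, 0), 0, 0)
  if st.1.1 = 0 then 0 else k * (st.1.1 - 1) + st.1.2 + 1

-- ===== PRECONDITION & SPEC =====
-- Pre_ excludes exactly the inputs where the Python A raises: n beyond len(a) (IndexError) and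
-- k = 0 with some processed element ≥ k (ZeroDivisionError); B raises on exactly the same inputs.
def Pre_solve (n : Int) (k : Int) (a : List Int) : Prop :=
  n ≤ (a.length : Int) ∧ (k ≠ 0 ∨ ∀ x ∈ a.take n.toNat, x < k)
instance (n : Int) (k : Int) (a : List Int) : Decidable (Pre_solve n k a) := by
  unfold Pre_solve; infer_instance
def pvWitness_solve : Int × Int × List Int := (3, 3, [4, 7, 1])

def Spec_solve (n : Int) (k : Int) (a : List Int) (out : Int) : Prop := out = solve_alt n k a
instance (n : Int) (k : Int) (a : List Int) (out : Int) : Decidable (Spec_solve n k a out) := by unfold Spec_solve; infer_instance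

-- ===== CLAIM (what is proved, stated in full; the proofs are below) =====
def Claim_equal_solve : Prop := ∀ (n : Int) (k : Int) (a : List Int), Dom_solve n k a → Pre_solve n k a → Spec_solve n k a (solve n k a)

-- ===== LEMMAS AND PROOFS =====

def lexLe (p r : Int × Int) : Prop := p.2 < r.2 ∨ (p.2 = r.2 ∧ p.1 ≤ r.1)

-- proof-side fold computing the lexicographic max of (value, count) pairs, the common
-- characterisation both ports are reduced to
def bstep (b : Option (Int × Int)) (p : Int × Int) : Option (Int × Int) :=
  match b with
  | none => some p
  | some q => if q.2 < p.2 ∨ (q.2 = p.2 ∧ q.1 < p.1) then some p else some q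

theorem foldB_some : ∀ (I : List (Int × Int)) (q : Int × Int),
    ∃ r, I.foldl bstep (some q) = some r ∧ (r = q ∨ r ∈ I) ∧ lexLe q r ∧ ∀ p ∈ I, lexLe p r := by
  intro I
  induction I with
  | nil => intro q; exact ⟨q, rfl, Or.inl rfl, Or.inr ⟨rfl, le_refl _⟩, by simp⟩
  | cons p t ih =>
    intro q
    obtain ⟨r, h1, h2, h3, h4⟩ := ih (if q.2 < p.2 ∨ (q.2 = p.2 ∧ q.1 < p.1) then p else q)
    refine ⟨r, ?_, ?_, ?_, ?_⟩
    · rw [List.foldl_cons]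
      show List.foldl bstep (bstep (some q) p) t = some r
      simp only [bstep]
      rwa [← apply_ite some]
    · rcases h2 with h | h
      · subst h; split_ifs at * <;> simp_all
      · exact Or.inr (List.mem_cons_of_mem _ h)
    · split_ifs at h3 with hc
      · have h3' := h3; unfold lexLe at h3' ⊢; omega
      · exact h3
    · intro x hx
      rcases List.mem_cons.mp hx with hx | hx
      · subst hx
        split_ifs at h3 with hc
        · exact h3
        · unfold lexLe at h3 ⊢; omega
      · exact h4 x hx

theorem maxval_eq (I : List (Int × Int)) (r : Int × Int) (m : Int)
    (hr : r ∈ I) (hle : ∀ p ∈ I, lexLe p r)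
    (hm : PySem.List.max? (I.map Prod.snd) (fun y => y) = some m) : m = r.2 := by
  have h1 := PySem.List.max?_isMax hm r.2 (List.mem_map_of_mem hr)
  have h2 := PySem.List.max?_mem hm
  obtain ⟨p, hp, hpm⟩ := List.mem_map.mp h2
  have := hle p hp
  unfold lexLe at this; omega

theorem maxkey_eq (J : List (Int × Int)) (r : Int × Int) (K : Int)
    (hrJ : r ∈ J) (hsnd : ∀ p ∈ J, p.2 = r.2) (hle : ∀ p ∈ J, lexLe p r)
    (hK : PySem.List.max? (J.map Prod.fst) (fun y => y) = some K) : K = r.1 := by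
  have h1 := PySem.List.max?_isMax hK r.1 (List.mem_map_of_mem hrJ)
  obtain ⟨p, hp, hpm⟩ := List.mem_map.mp (PySem.List.max?_mem hK)
  have h3 := hle p hp
  have h4 := hsnd p hp
  unfold lexLe at h3; omega

theorem set_ofList_filter (q : Int → Bool) (l : List Int) :
    PySem.Set.ofList (l.filter q) = (PySem.Set.ofList l).filter q := by
  induction l with
  | nil => simp [PySem.Set.ofList_nil]
  | cons x t ih =>
    rw [PySem.Set.ofList_cons]
    by_cases hx : q x = true
    · rw [List.filter_cons_of_pos hx, PySem.Set.ofList_cons, ih,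
        List.filter_cons_of_pos hx]
      simp only [PySem.Set.discard, List.filter_filter]
      congr 1
      apply List.filter_congr
      intro y _
      simp [Bool.and_comm]
    · rw [List.filter_cons_of_neg hx, ih, List.filter_cons_of_neg hx]
      simp only [PySem.Set.discard, List.filter_filter]
      apply List.filter_congr
      intro y _
      by_cases hy : y = x
      · subst hy; simp [hx]
      · simp [hy]

theorem popped_counter (mods : List Int) :
    (if (PySem.Dict.counter mods).contains 0
        then (PySem.Dict.counter mods).erase 0 else PySem.Dict.counter mods)
      = PySem.Dict.counter (mods.filter (fun m => !(m == 0))) := by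
  apply PySem.Dict.ext
  have hrhs : (if (PySem.Dict.counter mods).contains 0
      then (PySem.Dict.counter mods).erase 0 else PySem.Dict.counter mods).items
      = (PySem.Dict.counter mods).items.filter (fun p => !(p.1 == 0)) := by
    split_ifs with hc
    · simp [PySem.Dict.erase]
    · rw [eq_comm, List.filter_eq_self]
      intro p hp
      have hk : p.1 ∈ (PySem.Dict.counter mods).keys := PySem.Dict.mem_keys_of_mem_items _ hp
      have hz : ¬ ((0:Int) ∈ (PySem.Dict.counter mods).keys) := by
        intro hmem
        apply hc
        rw [PySem.Dict.contains_iff_mem_keys]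
        exact hmem
      have hne : p.1 ≠ 0 := fun h => hz (h ▸ hk)
      simpa using hne
  rw [hrhs, PySem.Dict.items_counter, PySem.Dict.items_counter, List.filter_map,
    set_ofList_filter]
  apply List.map_congr_left
  intro v hv
  have hv' : v ∈ mods.filter (fun m => !(m == 0)) := by
    simpa [PySem.Set.mem_ofList] using hv
  rw [List.count_filter (p := fun m : Int => !(m == 0)) (a := v) (l := mods)
    (by simpa using (List.mem_filter.mp hv').2)]

theorem eraseLoop (m : Int) : ∀ (ks : List Int) (d : PySem.Dict Int Int),
    (d.items.map Prod.fst).Nodup → (∀ p ∈ d.items, p.1 ∈ ks ∨ p.2 = m) →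
    (ks.foldl (fun d key => if d.getD key 0 ≠ m then d.erase key else d) d).items
      = d.items.filter (fun p => p.2 == m) := by
  intro ks
  induction ks with
  | nil =>
    intro d _ hcov
    show d.items = d.items.filter (fun p => p.2 == m)
    rw [eq_comm, List.filter_eq_self]
    intro p hp
    rcases hcov p hp with h | h
    · simp at h
    · simpa using h
  | cons key ks ih =>
    intro d hnd hcov
    rw [List.foldl_cons]
    have hknd : d.keys.Nodup := by
      rw [show d.keys = d.items.map Prod.fst from rfl]; exact hnd
    have hinj : ∀ p ∈ d.items, ∀ p' ∈ d.items, p.1 = p'.1 → p = p' :=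
      fun p hp p' hp' h => List.inj_on_of_nodup_map hnd hp hp' h
    have herase : (d.erase key).items = d.items.filter (fun p => !(p.1 == key)) := by
      simp [PySem.Dict.erase]
    have hsub : ∀ p ∈ d.items.filter (fun p : Int × Int => !(p.1 == key)), p.1 ∈ ks ∨ p.2 = m := by
      intro p hp
      have hpI := List.mem_filter.mp hp
      rcases hcov p hpI.1 with h | h
      · rcases List.mem_cons.mp h with h | h
        · exact absurd h (by simpa using hpI.2)
        · exact Or.inl h
      · exact Or.inr h
    by_cases hkey : key ∈ d.items.map Prod.fst
    · obtain ⟨p0, hp0, hp0k⟩ := List.mem_map.mp hkey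
      have hmem : (key, p0.2) ∈ d.items := by rwa [← hp0k]
      have hgd : d.getD key 0 = p0.2 :=
        PySem.Dict.getD_of_mem_items _ hmem hknd 0
      by_cases hvm : p0.2 = m
      · rw [hgd, if_neg (by simpa using hvm)]
        apply ih d hnd
        intro p hp
        rcases hcov p hp with h | h
        · rcases List.mem_cons.mp h with h | h
          · right
            have : p = p0 := hinj p hp p0 hp0 (h.trans hp0k.symm)
            rw [this]; exact hvm
          · exact Or.inl h
        · exact Or.inr h
      · rw [hgd, if_pos hvm]
        rw [ih (d.erase key) (by rw [herase]; exact (List.filter_sublist.map Prod.fst).nodup hnd)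
          (by rw [herase]; exact hsub), herase]
        rw [List.filter_filter]
        apply List.filter_congr
        intro p hp
        by_cases hpm : p.2 = m
        · have hpk : p.1 ≠ key := by
            intro h
            exact hvm ((hinj p hp p0 hp0 (h.trans hp0k.symm)) ▸ hpm)
          simp [hpm, hpk]
        · simp [hpm]
    · have hc : d.contains key = false := by
        rw [PySem.Dict.contains_eq_decide_mem_keys]
        simpa [show d.keys = d.items.map Prod.fst from rfl] using hkey
      have hgd : d.getD key 0 = 0 :=
        PySem.Dict.getD_of_not_contains _ 0 hc
      have hfix : d.items.filter (fun p : Int × Int => !(p.1 == key)) = d.items := by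
        rw [List.filter_eq_self]
        intro p hp
        have : p.1 ≠ key := fun h => hkey (h ▸ List.mem_map_of_mem hp)
        simpa using this
      have hcov' : ∀ p ∈ d.items, p.1 ∈ ks ∨ p.2 = m := by
        intro p hp
        rcases hcov p hp with h | h
        · rcases List.mem_cons.mp h with h | h
          · exact absurd (h ▸ List.mem_map_of_mem hp) hkey
          · exact Or.inl h
        · exact Or.inr h
      by_cases hz : (0:Int) = m
      · rw [hgd, if_neg (by simpa using hz)]
        exact ih d hnd hcov'
      · rw [hgd, if_pos hz]
        rw [ih (d.erase key) (by rw [herase, hfix]; exact hnd) (by rw [herase, hfix]; exact hcov'),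
          herase, hfix]

theorem core_eq (k : Int) (L : List Int) :
    (if (PySem.Dict.counter (κ := Int) L).size = 0 then 0
     else
       if (PySem.List.max? (PySem.Dict.counter L).values fun y => y).getD 0 = 1 then
         (PySem.List.max? (PySem.Dict.counter L).keys fun y => y).getD 0 + 1
       else
         k * ((PySem.List.max? (PySem.Dict.counter L).values fun y => y).getD 0 - 1) +
             (PySem.List.max?
               (List.foldl
                 (fun d key =>
                   if d.getD key 0 ≠ (PySem.List.max? (PySem.Dict.counter L).values fun y => y).getD 0
                   then d.erase key else d)
                 (PySem.Dict.counter L) (PySem.Dict.counter L).keys).keys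
               fun y => y).getD 0 + 1)
    = match List.foldl bstep none (PySem.Dict.counter L).items with
      | none => 0
      | some (v, c) => k * (c - 1) + v + 1 := by
  have hIc : (PySem.Dict.counter L).items
      = (PySem.Set.ofList L).map (fun v => (v, (L.count v : Int))) :=
    PySem.Dict.items_counter L
  have hfst : (PySem.Dict.counter L).items.map Prod.fst = PySem.Set.ofList L := by
    rw [hIc, List.map_map]
    have hid : (Prod.fst ∘ fun v : Int => (v, (L.count v : Int))) = id := rfl
    rw [hid, List.map_id]
  have hnd : ((PySem.Dict.counter L).items.map Prod.fst).Nodup := by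
    rw [hfst]; exact PySem.Set.nodup_ofList L
  have hpos : ∀ p ∈ (PySem.Dict.counter L).items, 1 ≤ p.2 := by
    rw [hIc]
    intro p hp
    obtain ⟨v, hv, rfl⟩ := List.mem_map.mp hp
    have : v ∈ L := (PySem.Set.mem_ofList _ _).mp hv
    have : 0 < L.count v := List.count_pos_iff.mpr this
    show (1:Int) ≤ (L.count v : Int)
    exact_mod_cast this
  have hvals : (PySem.Dict.counter L).values = (PySem.Dict.counter L).items.map Prod.snd := rfl
  have hkeys : (PySem.Dict.counter L).keys = (PySem.Dict.counter L).items.map Prod.fst := rfl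
  cases hI : (PySem.Dict.counter L).items with
  | nil =>
    have hszl : (PySem.Dict.counter (κ := Int) L).size = (PySem.Dict.counter L).items.length := rfl
    have hsz : (PySem.Dict.counter L).size = 0 := by
      rw [hszl, hI]
      rfl
    rw [if_pos hsz]
    rfl
  | cons p t =>
    have hszl : (PySem.Dict.counter (κ := Int) L).size = (PySem.Dict.counter L).items.length := rfl
    have hsz : ¬ (PySem.Dict.counter (κ := Int) L).size = 0 := by
      rw [hszl, hI]
      simp
    rw [if_neg hsz]
    obtain ⟨r, hr1, hr2, hr3, hr4⟩ := foldB_some t p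
    have hrI : r ∈ (PySem.Dict.counter L).items := by
      rw [hI]
      rcases hr2 with h | h
      · exact h ▸ List.mem_cons_self
      · exact List.mem_cons_of_mem _ h
    have hle : ∀ x ∈ (PySem.Dict.counter L).items, lexLe x r := by
      rw [hI]
      intro x hx
      rcases List.mem_cons.mp hx with h | h
      · exact h ▸ hr3
      · exact hr4 x h
    have hfold : List.foldl bstep none (p :: t) = some r := by
      rw [show List.foldl bstep none (p :: t) = List.foldl bstep (some p) t from rfl, hr1]
    rw [hfold]
    obtain ⟨rv, rc⟩ := r
    have hvne : (PySem.Dict.counter L).values ≠ [] := by rw [hvals, hI]; simp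
    cases hm : PySem.List.max? (PySem.Dict.counter L).values (fun y => y) with
    | none => exact absurd ((PySem.List.max?_eq_none_iff _ _).mp hm) hvne
    | some m =>
    have hm2 : m = rc := maxval_eq (PySem.Dict.counter L).items (rv, rc) m hrI hle
      (hvals ▸ hm)
    rw [show (some m).getD (0:Int) = m from rfl]
    by_cases h1 : m = 1
    · rw [if_pos h1]
      have hkne : (PySem.Dict.counter L).keys ≠ [] := by rw [hkeys, hI]; simp
      cases hK : PySem.List.max? (PySem.Dict.counter L).keys (fun y => y) with
      | none => exact absurd ((PySem.List.max?_eq_none_iff _ _).mp hK) hkne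
      | some K =>
      have hall : ∀ p' ∈ (PySem.Dict.counter L).items, p'.2 = (rv, rc).2 := by
        intro p' hp'
        have ha := hpos p' hp'
        have hb : p'.2 ≤ m := PySem.List.max?_isMax hm p'.2
          (by rw [hvals]; exact List.mem_map_of_mem hp')
        simp only
        omega
      have hKr : K = rv := maxkey_eq (PySem.Dict.counter L).items (rv, rc) K hrI hall hle
        (hkeys ▸ hK)
      simp only [Option.getD_some]
      rw [hKr]
      have : rc = 1 := by omega
      rw [this]
      ring
    · rw [if_neg h1]
      have heraseItems := eraseLoop m (PySem.Dict.counter L).keys (PySem.Dict.counter L) hnd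
        (fun p' hp' => Or.inl (by rw [hkeys]; exact List.mem_map_of_mem hp'))
      have hfkeys : (List.foldl
          (fun d key => if d.getD key 0 ≠ m then d.erase key else d)
          (PySem.Dict.counter L) (PySem.Dict.counter L).keys).keys
          = ((PySem.Dict.counter L).items.filter (fun p => p.2 == m)).map Prod.fst := by
        rw [show ∀ d : PySem.Dict Int Int, d.keys = d.items.map Prod.fst from fun _ => rfl,
          heraseItems]
      have hrJ : (rv, rc) ∈ (PySem.Dict.counter L).items.filter (fun p => p.2 == m) := by
        rw [List.mem_filter]
        exact ⟨hrI, by simp [hm2]⟩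
      have hJne : ((PySem.Dict.counter L).items.filter (fun p => p.2 == m)).map Prod.fst ≠ [] := by
        simp only [ne_eq, List.map_eq_nil_iff]
        intro h
        rw [h] at hrJ
        simp at hrJ
      rw [hfkeys]
      cases hK : PySem.List.max?
          (((PySem.Dict.counter L).items.filter (fun p => p.2 == m)).map Prod.fst)
          (fun y => y) with
      | none => exact absurd ((PySem.List.max?_eq_none_iff _ _).mp hK) hJne
      | some K =>
      have hsnd : ∀ p' ∈ (PySem.Dict.counter L).items.filter (fun p => p.2 == m),
          p'.2 = (rv, rc).2 := by
        intro p' hp'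
        have h' : p'.2 = m := by simpa using (List.mem_filter.mp hp').2
        simp only
        omega
      have hleJ : ∀ p' ∈ (PySem.Dict.counter L).items.filter (fun p => p.2 == m),
          lexLe p' (rv, rc) := fun p' hp' => hle p' (List.mem_filter.mp hp').1
      have hKr : K = rv := maxkey_eq _ (rv, rc) K hrJ hsnd hleJ hK
      simp only [Option.getD_some]
      rw [hKr, hm2]

-- ===== B-side: invariant of the sorted run scan =====

def bestInv (p : List Int) (b : Int × Int) : Prop :=
  (b.1 = 0 ∧ b.2 = 0 ∧ ∀ x ∈ p, x = 0) ∨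
  (b.1 ≠ 0 ∧ b.2 ∈ p ∧ b.2 ≠ 0 ∧ b.1 = (p.count b.2 : Int) ∧
    ∀ v ∈ p, v ≠ 0 → lexLe (v, (p.count v : Int)) (b.2, b.1))

def runInv (p : List Int) (st : (Int × Int) × Int × Int) : Prop :=
  (p = [] ∧ st = ((0, 0), 0, 0)) ∨
  (∃ t, p = t ++ [st.2.2] ∧ st.2.1 = (p.count st.2.2 : Int) ∧ bestInv p st.1)

theorem count_app (p : List Int) (x v : Int) :
    ((p ++ [x]).count v : Int) = (p.count v : Int) + if v = x then 1 else 0 := by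
  simp [List.count_append, List.count_cons]
  split_ifs <;> simp_all

theorem lexLe_le {v c bv bc : Int} (h : lexLe (v, c) (bv, bc)) : c ≤ bc := by
  unfold lexLe at h; omega

theorem lexLe_intro {v c bv bc : Int} (h : c < bc ∨ (c = bc ∧ v ≤ bv)) :
    lexLe (v, c) (bv, bc) := h

theorem runInv_mk (p' t : List Int) (b : Int × Int) (rc' rv' : Int)
    (h1 : p' = t ++ [rv']) (h2 : rc' = (p'.count rv' : Int)) (h3 : bestInv p' b) :
    runInv p' (b, rc', rv') := Or.inr ⟨t, h1, h2, h3⟩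

theorem bestInv_none (p' : List Int) (h : ∀ x ∈ p', x = 0) : bestInv p' (0, 0) :=
  Or.inl ⟨rfl, rfl, h⟩

theorem bestInv_mk (p' : List Int) (bc' bv' : Int) (h1 : bc' ≠ 0) (h2 : bv' ∈ p')
    (h3 : bv' ≠ 0) (h4 : bc' = (p'.count bv' : Int))
    (h5 : ∀ v ∈ p', v ≠ 0 → lexLe (v, (p'.count v : Int)) (bv', bc')) :
    bestInv p' (bc', bv') := Or.inr ⟨h1, h2, h3, h4, h5⟩

theorem step_inv (p : List Int) (x : Int) (st : (Int × Int) × Int × Int)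
    (hs : (p ++ [x]).Pairwise (· ≤ ·)) (h : runInv p st) :
    runInv (p ++ [x]) (bstep2 st x) := by
  obtain ⟨⟨bc, bv⟩, rc, rv⟩ := st
  have hlex : ∀ y ∈ p, y ≤ x := fun y hy =>
    (List.pairwise_append.mp hs).2.2 y hy x (List.mem_singleton.mpr rfl)
  rcases h with ⟨hp, hst⟩ | ⟨t, hp, hrc, hb⟩
  · -- p = []
    subst hp
    obtain ⟨⟨h1, h2⟩, h3, h4⟩ : (bc = 0 ∧ bv = 0) ∧ rc = 0 ∧ rv = 0 := by
      simpa [Prod.ext_iff] using hst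
    subst h1; subst h2; subst h3; subst h4
    simp only [bstep2]
    split_ifs with h1 h2 h2
    · exact absurd h1 (by simp)
    · exact absurd h1 (by simp)
    · have hx : x ≠ 0 := h2.1
      refine runInv_mk _ [] (1, x) 1 x rfl (by simp)
        (bestInv_mk _ 1 x one_ne_zero (by simp) hx (by simp) ?_)
      intro v hv hv0
      have hvx : v = x := by simpa using hv
      subst hvx
      exact lexLe_intro (by simp)
    · have hx : x = 0 := by
        by_contra hx0
        exact h2 ⟨hx0, by norm_num⟩
      subst hx
      exact runInv_mk _ [] (0, 0) 1 0 rfl (by simp) (bestInv_none _ (by simp))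
  · -- p = t ++ [rv]
    have hrc' : rc = (p.count rv : Int) := hrc
    have hb' : bestInv p (bc, bv) := hb
    have hp' : p = t ++ [rv] := hp
    clear hrc hb hp
    have hrvmem : rv ∈ p := by rw [hp']; simp
    have hrcpos : (1 : Int) ≤ (p.count rv : Int) := by
      exact_mod_cast List.count_pos_iff.mpr hrvmem
    have hrc1 : (1 : Int) ≤ rc := by rw [hrc']; exact hrcpos
    have hlastle : ∀ v ∈ p, v ≤ rv := by
      have hpw : p.Pairwise (· ≤ ·) := hs.sublist (List.sublist_append_left _ _)
      rw [hp'] at hpw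
      intro v hv
      rw [hp'] at hv
      rcases List.mem_append.mp hv with hv | hv
      · exact (List.pairwise_append.mp hpw).2.2 v hv rv (List.mem_singleton.mpr rfl)
      · exact le_of_eq (List.mem_singleton.mp hv)
    have hrvx : rv ≤ x := hlex rv hrvmem
    simp only [bstep2]
    split_ifs with h1 h2 h2
    · -- run continues, best updated
      have hx : x = rv := h1.2
      have hz : rv ≠ 0 := h2.1
      have hge : rc + 1 ≥ bc := h2.2
      have hcx : ((p ++ [x]).count rv : Int) = (p.count rv : Int) + 1 := by
        rw [count_app, if_pos hx.symm]
      have hcv : ∀ v : Int, v ≠ rv → ((p ++ [x]).count v : Int) = (p.count v : Int) := by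
        intro v hv
        rw [count_app, if_neg (fun hvx => hv (hvx.trans hx)), add_zero]
      refine runInv_mk _ p (rc + 1, rv) (rc + 1) rv (by rw [hx]) (by rw [hcx, ← hrc'])
        (bestInv_mk _ (rc + 1) rv (by omega) (List.mem_append_left _ hrvmem) hz
          (by rw [hcx, ← hrc']) ?_)
      intro v hv hv0
      by_cases hvr : v = rv
      · subst hvr
        have := hcx
        exact lexLe_intro (by omega)
      · have hvp : v ∈ p := by
          rcases List.mem_append.mp hv with h | h
          · exact h
          · exact absurd ((List.mem_singleton.mp h).trans hx) hvr
        rw [hcv v hvr]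
        rcases hb' with ⟨_, _, hbz⟩ | ⟨_, _, _, _, h5⟩
        · exact absurd (hbz v hvp) hv0
        · have h6 := lexLe_le (h5 v hvp hv0)
          have h7 := hlastle v hvp
          exact lexLe_intro (by omega)
    · -- run continues, best kept
      have hx : x = rv := h1.2
      have hcx : ((p ++ [x]).count rv : Int) = (p.count rv : Int) + 1 := by
        rw [count_app, if_pos hx.symm]
      have hcv : ∀ v : Int, v ≠ rv → ((p ++ [x]).count v : Int) = (p.count v : Int) := by
        intro v hv
        rw [count_app, if_neg (fun hvx => hv (hvx.trans hx)), add_zero]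
      have hc : rv = 0 ∨ rc + 1 < bc := by
        by_contra hcc
        push Not at hcc
        exact h2 ⟨hcc.1, by omega⟩
      refine runInv_mk _ p (bc, bv) (rc + 1) rv (by rw [hx]) (by rw [hcx, ← hrc']) ?_
      rcases hb' with ⟨hb1, hb2, hb3⟩ | ⟨hb1, hb2, hb3, hb4, hb5⟩
      · subst hb1; subst hb2
        rcases hc with h | h
        · refine bestInv_none _ ?_
          intro v hv
          rcases List.mem_append.mp hv with hv | hv
          · exact hb3 v hv
          · rw [List.mem_singleton.mp hv, hx, h]
        · exact absurd h (by omega)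
      · have hbvrv : bv ≠ rv := by
          intro he
          rcases hc with h | h
          · exact hb3 (he.trans h)
          · rw [he, ← hrc'] at hb4
            omega
        refine bestInv_mk _ bc bv hb1 (List.mem_append_left _ hb2) hb3
          (by rw [hcv bv hbvrv]; exact hb4) ?_
        intro v hv hv0
        by_cases hvr : v = rv
        · subst hvr
          rcases hc with h | h
          · exact absurd h hv0
          · have := hcx
            exact lexLe_intro (by omega)
        · have hvp : v ∈ p := by
            rcases List.mem_append.mp hv with h | h
            · exact h
            · exact absurd ((List.mem_singleton.mp h).trans hx) hvr
          rw [hcv v hvr]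
          exact hb5 v hvp hv0
    · -- new run, best updated
      have hx : x ≠ rv := fun he => h1 ⟨by omega, he⟩
      have hz : x ≠ 0 := h2.1
      have hge : (1 : Int) ≥ bc := h2.2
      have hxnp : x ∉ p := fun hxp => hx (le_antisymm (hlastle x hxp) hrvx)
      have hcx : ((p ++ [x]).count x : Int) = 1 := by
        rw [count_app, if_pos rfl, List.count_eq_zero.mpr hxnp]
        norm_num
      have hcv : ∀ v : Int, v ≠ x → ((p ++ [x]).count v : Int) = (p.count v : Int) := by
        intro v hv
        rw [count_app, if_neg hv, add_zero]
      refine runInv_mk _ p (1, x) 1 x rfl (by rw [hcx])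
        (bestInv_mk _ 1 x one_ne_zero
          (List.mem_append_right _ (List.mem_singleton.mpr rfl)) hz (by rw [hcx]) ?_)
      intro v hv hv0
      by_cases hvx : v = x
      · subst hvx
        have := hcx
        exact lexLe_intro (by omega)
      · have hvp : v ∈ p := by
          rcases List.mem_append.mp hv with h | h
          · exact h
          · exact absurd (List.mem_singleton.mp h) hvx
        rw [hcv v hvx]
        rcases hb' with ⟨_, _, hbz⟩ | ⟨_, _, _, _, h5⟩
        · exact absurd (hbz v hvp) hv0
        · have h6 := lexLe_le (h5 v hvp hv0)
          have h7 : (1 : Int) ≤ (p.count v : Int) := by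
            exact_mod_cast List.count_pos_iff.mpr hvp
          have h8 := hlex v hvp
          exact lexLe_intro (by omega)
    · -- new run, best kept
      have hx : x ≠ rv := fun he => h1 ⟨by omega, he⟩
      have hxnp : x ∉ p := fun hxp => hx (le_antisymm (hlastle x hxp) hrvx)
      have hcx : ((p ++ [x]).count x : Int) = 1 := by
        rw [count_app, if_pos rfl, List.count_eq_zero.mpr hxnp]
        norm_num
      have hcv : ∀ v : Int, v ≠ x → ((p ++ [x]).count v : Int) = (p.count v : Int) := by
        intro v hv
        rw [count_app, if_neg hv, add_zero]
      have hc : x = 0 ∨ 1 < bc := by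
        by_contra hcc
        push Not at hcc
        exact h2 ⟨hcc.1, by omega⟩
      refine runInv_mk _ p (bc, bv) 1 x rfl (by rw [hcx]) ?_
      rcases hb' with ⟨hb1, hb2, hb3⟩ | ⟨hb1, hb2, hb3, hb4, hb5⟩
      · subst hb1; subst hb2
        rcases hc with h | h
        · refine bestInv_none _ ?_
          intro v hv
          rcases List.mem_append.mp hv with hv | hv
          · exact hb3 v hv
          · rw [List.mem_singleton.mp hv, h]
        · exact absurd h (by omega)
      · have hbvx : bv ≠ x := fun he => hxnp (he ▸ hb2)
        refine bestInv_mk _ bc bv hb1 (List.mem_append_left _ hb2) hb3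
          (by rw [hcv bv hbvx]; exact hb4) ?_
        intro v hv hv0
        by_cases hvx : v = x
        · subst hvx
          rcases hc with h | h
          · exact absurd h hv0
          · have := hcx
            exact lexLe_intro (by omega)
        · have hvp : v ∈ p := by
            rcases List.mem_append.mp hv with h | h
            · exact h
            · exact absurd (List.mem_singleton.mp h) hvx
          rw [hcv v hvx]
          exact hb5 v hvp hv0

theorem scan_inv : ∀ (s p : List Int) (st : (Int × Int) × Int × Int),
    (p ++ s).Pairwise (· ≤ ·) → runInv p st → runInv (p ++ s) (s.foldl bstep2 st) := by
  intro s
  induction s with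
  | nil => intro p st h hi; simpa using hi
  | cons x t ih =>
    intro p st h hi
    have h' : ((p ++ [x]) ++ t).Pairwise (· ≤ ·) := by simpa using h
    have h1 : (p ++ [x]).Pairwise (· ≤ ·) :=
      h'.sublist (List.sublist_append_left _ _)
    have := ih (p ++ [x]) (bstep2 st x) h' (step_inv p x st h1 hi)
    simpa using this

theorem scan_eq_foldB (k : Int) (L : List Int) :
    (let st := (PySem.List.sorted L (fun y => y) false).foldl bstep2 ((0, 0), 0, 0);
     if st.1.1 = 0 then 0 else k * (st.1.1 - 1) + st.1.2 + 1)
    = match List.foldl bstep none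
        (PySem.Dict.counter (L.filter (fun m => !(m == 0)))).items with
      | none => 0
      | some (v, c) => k * (c - 1) + v + 1 := by
  have hperm : (PySem.List.sorted L (fun y => y) false).Perm L := PySem.List.sorted_perm L _ _
  have hpw : (PySem.List.sorted L (fun y => y) false).Pairwise (· ≤ ·) :=
    PySem.List.sorted_pairwise L (fun y => y)
  have hinv := scan_inv (PySem.List.sorted L (fun y => y) false) [] ((0, 0), 0, 0)
    (by simpa using hpw) (Or.inl ⟨rfl, rfl⟩)
  simp only [List.nil_append] at hinv
  have hIc : (PySem.Dict.counter (L.filter (fun m => !(m == 0)))).items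
      = (PySem.Set.ofList (L.filter (fun m => !(m == 0)))).map
          (fun v => (v, ((L.filter (fun m => !(m == 0))).count v : Int))) :=
    PySem.Dict.items_counter _
  have hmemF : ∀ v : Int, v ∈ L.filter (fun m => !(m == 0)) ↔ v ∈ L ∧ v ≠ 0 := by
    intro v; simp [List.mem_filter]
  have hcntF : ∀ v : Int, v ≠ 0 →
      (L.filter (fun m => !(m == 0))).count v = L.count v := by
    intro v hv
    exact List.count_filter (by simpa using hv)
  have hcntS : ∀ v : Int, (PySem.List.sorted L (fun y => y) false).count v = L.count v :=
    fun v => hperm.count_eq v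
  have hmemS : ∀ v : Int, v ∈ PySem.List.sorted L (fun y => y) false ↔ v ∈ L :=
    fun v => hperm.mem_iff
  show (if ((PySem.List.sorted L (fun y => y) false).foldl bstep2 ((0, 0), 0, 0)).1.1 = 0
      then 0
      else k * (((PySem.List.sorted L (fun y => y) false).foldl bstep2 ((0, 0), 0, 0)).1.1 - 1)
        + ((PySem.List.sorted L (fun y => y) false).foldl bstep2 ((0, 0), 0, 0)).1.2 + 1) = _
  cases hI : (PySem.Dict.counter (L.filter (fun m => !(m == 0)))).items with
  | nil =>
    have hset : PySem.Set.ofList (L.filter (fun m => !(m == 0))) = [] :=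
      List.map_eq_nil_iff.mp (hIc.symm.trans hI)
    have hFnil : L.filter (fun m => !(m == 0)) = [] := by
      by_contra hne
      obtain ⟨w, hw⟩ := List.exists_mem_of_ne_nil _ hne
      have hmem := (PySem.Set.mem_ofList _ _).mpr hw
      rw [hset] at hmem
      simp at hmem
    have hallz : ∀ v ∈ PySem.List.sorted L (fun y => y) false, v = 0 := by
      intro v hv
      by_contra hv0
      have : v ∈ L.filter (fun m => !(m == 0)) :=
        (hmemF v).mpr ⟨(hmemS v).mp hv, hv0⟩
      rw [hFnil] at this
      simp at this
    have hbc0 : ((PySem.List.sorted L (fun y => y) false).foldl bstep2 ((0, 0), 0, 0)).1.1 = 0 := by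
      rcases hinv with ⟨_, hstv⟩ | ⟨t, _, _, hb⟩
      · rw [hstv]
      · rcases hb with ⟨h1, _, _⟩ | ⟨_, h2, h3, _, _⟩
        · exact h1
        · exact absurd (hallz _ h2) h3
    rw [if_pos hbc0]
    rfl
  | cons q tl =>
    obtain ⟨r, hr1, hr2, hr3, hr4⟩ := foldB_some tl q
    have hfold : List.foldl bstep none (q :: tl) = some r := by
      rw [show List.foldl bstep none (q :: tl) = List.foldl bstep (some q) tl from rfl, hr1]
    rw [hfold]
    -- the scanned list is nonempty and has a nonzero element
    have hqmem : q ∈ (PySem.Dict.counter (L.filter (fun m => !(m == 0)))).items := by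
      rw [hI]; exact List.mem_cons_self
    have hrmem : r ∈ (PySem.Dict.counter (L.filter (fun m => !(m == 0)))).items := by
      rw [hI]
      rcases hr2 with h | h
      · exact h ▸ List.mem_cons_self
      · exact List.mem_cons_of_mem _ h
    have hrshape : r.1 ∈ L.filter (fun m => !(m == 0)) ∧
        r.2 = ((L.filter (fun m => !(m == 0))).count r.1 : Int) := by
      rw [hIc] at hrmem
      obtain ⟨w, hw, hwe⟩ := List.mem_map.mp hrmem
      constructor
      · rw [← hwe]; exact (PySem.Set.mem_ofList _ _).mp hw
      · rw [← hwe]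
    have hr1z : r.1 ≠ 0 := ((hmemF r.1).mp hrshape.1).2
    have hr1L : r.1 ∈ L := ((hmemF r.1).mp hrshape.1).1
    have hr1S : r.1 ∈ PySem.List.sorted L (fun y => y) false := (hmemS r.1).mpr hr1L
    -- extract the best state
    rcases hinv with ⟨hnil, _⟩ | ⟨t, _, _, hb⟩
    · rw [hnil] at hr1S; simp at hr1S
    rcases hb with ⟨_, _, hz⟩ | ⟨h1, h2, h3, h4, h5⟩
    · exact absurd (hz _ hr1S) hr1z
    rw [if_neg h1]
    -- the best pair is an item of the counter
    have hbvF : ((PySem.List.sorted L (fun y => y) false).foldl bstep2 ((0, 0), 0, 0)).1.2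
        ∈ L.filter (fun m => !(m == 0)) :=
      (hmemF _).mpr ⟨(hmemS _).mp h2, h3⟩
    have hbitem : (((PySem.List.sorted L (fun y => y) false).foldl bstep2 ((0, 0), 0, 0)).1.2,
        ((PySem.List.sorted L (fun y => y) false).foldl bstep2 ((0, 0), 0, 0)).1.1)
        ∈ (PySem.Dict.counter (L.filter (fun m => !(m == 0)))).items := by
      rw [hIc]
      have : ((L.filter (fun m => !(m == 0))).count
          (((PySem.List.sorted L (fun y => y) false).foldl bstep2 ((0, 0), 0, 0)).1.2) : Int)
          = ((PySem.List.sorted L (fun y => y) false).foldl bstep2 ((0, 0), 0, 0)).1.1 := by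
        rw [hcntF _ h3, ← hcntS, ← h4]
      rw [← this]
      exact List.mem_map_of_mem ((PySem.Set.mem_ofList _ _).mpr hbvF)
    -- lexLe both ways
    have hle1 : lexLe (((PySem.List.sorted L (fun y => y) false).foldl bstep2 ((0, 0), 0, 0)).1.2,
        ((PySem.List.sorted L (fun y => y) false).foldl bstep2 ((0, 0), 0, 0)).1.1) r := by
      rw [hI] at hbitem
      rcases List.mem_cons.mp hbitem with h | h
      · exact h ▸ hr3
      · exact hr4 _ h
    have hle2 : lexLe r (((PySem.List.sorted L (fun y => y) false).foldl bstep2 ((0, 0), 0, 0)).1.2,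
        ((PySem.List.sorted L (fun y => y) false).foldl bstep2 ((0, 0), 0, 0)).1.1) := by
      have := h5 r.1 hr1S hr1z
      have hrc : ((PySem.List.sorted L (fun y => y) false).count r.1 : Int) = r.2 := by
        rw [hcntS, ← hcntF _ hr1z, ← hrshape.2]
      rw [hrc] at this
      exact this
    have hreq : r = (((PySem.List.sorted L (fun y => y) false).foldl bstep2 ((0, 0), 0, 0)).1.2,
        ((PySem.List.sorted L (fun y => y) false).foldl bstep2 ((0, 0), 0, 0)).1.1) := by
      obtain ⟨r1, r2⟩ := r
      unfold lexLe at hle1 hle2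
      simp only at hle1 hle2
      have e2 : r2 = ((PySem.List.sorted L (fun y => y) false).foldl bstep2 ((0, 0), 0, 0)).1.1 := by
        omega
      have e1 : r1 = ((PySem.List.sorted L (fun y => y) false).foldl bstep2 ((0, 0), 0, 0)).1.2 := by
        omega
      rw [e1, e2]
    rw [hreq]

-- ===== VERDICT (by name: the statement is the Claim_ definition above) =====
theorem solve_spec : Claim_equal_solve := by
  intro n k a _ _
  unfold Spec_solve solve solve_alt
  simp only [popped_counter]
  rw [core_eq k _]
  exact (scan_eq_foldB k _).symm
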